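-- pv_equiv track=rewrite | github.com/wojtask/CormenPy | src/chapter06/problem6_3.py | young_search
-- ===== SOURCE A (Python) =====
-- def young_search(Y, m, n, v):
--     i = 1
--     j = n
--     while i <= m and j >= 1:
--         if v == Y[i, j]:
--             return True
--         if v > Y[i, j]:
--             i += 1
--         else:
--             j -= 1
--     return False
-- ===== SOURCE B (Python) =====
-- def young_search(Y, m, n, v):
--     # an empty grid contains nothing
--     if m < 1 or n < 1:
--         return False
--     # exhaustive scan of the whole m-by-n grid: v is in the tableau
--     # iff it equals some cell value
--     return any(Y[i, j] == v
--                for i in range(1, m + 1)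
--                for j in range(1, n + 1))
-- ===== Notes on version B (the rewrite author's own statement) =====
-- stated objective: simpler
-- what changed: Replaces the diagonal staircase descent (start at top-right, step down or left) by a flat exhaustive any-scan over all m*n cells of the grid; Pre_ restricts to genuine Young tableaux (complete m-by-n grid, no duplicate keys, rows and columns nondecreasing), excluding incomplete grids where A's staircase may return before a missing key while B's full scan raises KeyError, and non-sorted grids where A's staircase can miss a present value so its answer is an accident of its probe order.
-- outside the precondition, e.g. on young_search({(1, 1): 9, (1, 2): 9, (2, 1): 0, (2, 2): 9}, 2, 2, 0): A returns False, B returns True; on young_search({(1, 2): 5}, 1, 2, 5): A returns True, B raises KeyError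
import Mathlib
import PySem

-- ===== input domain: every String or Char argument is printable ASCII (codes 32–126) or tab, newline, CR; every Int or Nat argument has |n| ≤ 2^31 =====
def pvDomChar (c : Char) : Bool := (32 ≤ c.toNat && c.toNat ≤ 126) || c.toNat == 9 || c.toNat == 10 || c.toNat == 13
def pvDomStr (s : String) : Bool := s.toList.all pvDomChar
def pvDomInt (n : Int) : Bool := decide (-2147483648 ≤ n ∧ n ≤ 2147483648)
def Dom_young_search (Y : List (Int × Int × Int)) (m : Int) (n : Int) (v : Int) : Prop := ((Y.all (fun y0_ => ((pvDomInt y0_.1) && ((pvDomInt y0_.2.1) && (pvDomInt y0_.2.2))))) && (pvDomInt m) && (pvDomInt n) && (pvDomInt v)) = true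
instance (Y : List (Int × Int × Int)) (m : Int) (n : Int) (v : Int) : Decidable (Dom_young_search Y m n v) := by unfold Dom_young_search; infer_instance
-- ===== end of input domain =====

-- B replaces A's diagonal staircase descent by a flat exhaustive scan of the whole grid
-- (different algorithm, same results on genuine Young tableaux; simpler, not faster).


-- shared dict primitive: Y[(i, j)] as first-match lookup in the association list
def pyGetKV (Y : List (Int × Int × Int)) (i j : Int) : Option Int :=
  match Y with
  | [] => none
  | t :: rest => if t.1 = i ∧ t.2.1 = j then some t.2.2 else pyGetKV rest i j

-- ===== PORT A =====
-- the while loop of A: staircase descent from (i, j)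
def youngLoopA (Y : List (Int × Int × Int)) (m v i j : Int) : Bool :=
  if h : i ≤ m ∧ 1 ≤ j then
    match pyGetKV Y i j with
    | none => false  -- Python raises KeyError here; excluded by Pre_
    | some y =>
      if v = y then true
      else if v > y then youngLoopA Y m v (i + 1) j
      else youngLoopA Y m v i (j - 1)
  else false
termination_by ((m + 1 - i).toNat + j.toNat)
decreasing_by all_goals omega

def young_search (Y : List (Int × Int × Int)) (m : Int) (n : Int) (v : Int) : Bool :=
  youngLoopA Y m v 1 n

-- ===== PORT B =====
-- Source B: any(Y[i, j] == v for i in range(1, m+1) for j in range(1, n+1))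
def young_search_alt (Y : List (Int × Int × Int)) (m : Int) (n : Int) (v : Int) : Bool :=
  if m < 1 ∨ n < 1 then false else
  (PySem.List.pyRange 1 (m + 1) 1).any fun i =>
    (PySem.List.pyRange 1 (n + 1) 1).any fun j =>
      match pyGetKV Y i j with
      | some y => y == v
      | none => false  -- Python raises KeyError here; excluded by Pre_

-- ===== PRECONDITION & SPEC =====
-- Pre_ restricts to genuine m×n Young tableaux, stated in closed form on the list itself:
-- distinct keys (a Python dict has no duplicates), every key of the 1..m × 1..n grid present
-- (an incomplete grid makes one of the probe orders raise KeyError), and every horizontally or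
-- vertically adjacent pair of in-grid entries nondecreasing (on a non-sorted grid A's staircase
-- answer is an accident of its probe order).
def Pre_young_search (Y : List (Int × Int × Int)) (m : Int) (n : Int) (v : Int) : Prop :=
  (Y.map (fun t => (t.1, t.2.1))).Nodup ∧
  (1 ≤ m → 1 ≤ n →
    m.toNat * n.toNat ≤ Y.length ∧
    (∀ a < m.toNat, ∀ b < n.toNat, ((a : Int) + 1, (b : Int) + 1) ∈ Y.map (fun t => (t.1, t.2.1))) ∧
    (∀ s ∈ Y, ∀ t ∈ Y, 1 ≤ s.1 → s.1 ≤ m → 1 ≤ s.2.1 → t.2.1 ≤ n →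
      s.1 = t.1 → s.2.1 + 1 = t.2.1 → s.2.2 ≤ t.2.2) ∧
    (∀ s ∈ Y, ∀ t ∈ Y, 1 ≤ s.2.1 → s.2.1 ≤ n → 1 ≤ s.1 → t.1 ≤ m →
      s.2.1 = t.2.1 → s.1 + 1 = t.1 → s.2.2 ≤ t.2.2))
instance (Y : List (Int × Int × Int)) (m : Int) (n : Int) (v : Int) : Decidable (Pre_young_search Y m n v) := by
  unfold Pre_young_search
  refine @instDecidableAnd _ _ ?_ (@instDecidableForall _ _ ?_ (@instDecidableForall _ _ ?_ ?_))
  · infer_instance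
  · infer_instance
  · infer_instance
  refine @instDecidableAnd _ _ ?_ (@instDecidableAnd _ _ ?_ (@instDecidableAnd _ _ ?_ ?_)) <;> infer_instance

def pvWitness_young_search : (List (Int × Int × Int)) × Int × Int × Int :=
  ([(1, 1, 1), (1, 2, 2), (2, 1, 3), (2, 2, 4)], 2, 2, 3)

def Spec_young_search (Y : List (Int × Int × Int)) (m : Int) (n : Int) (v : Int) (out : Bool) : Prop := out = young_search_alt Y m n v
instance (Y : List (Int × Int × Int)) (m : Int) (n : Int) (v : Int) (out : Bool) : Decidable (Spec_young_search Y m n v out) := by unfold Spec_young_search; infer_instance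

-- ===== CLAIM (what is proved, stated in full; the proofs are below) =====
def Claim_equal_young_search : Prop := ∀ (Y : List (Int × Int × Int)) (m : Int) (n : Int) (v : Int), Dom_young_search Y m n v → Pre_young_search Y m n v → Spec_young_search Y m n v (young_search Y m n v)

-- ===== LEMMAS AND PROOFS =====

-- value of the 0-indexed cell (a, b), i.e. the dict entry at key (a+1, b+1) (proof-side shorthand)
def cellv (Y : List (Int × Int × Int)) (a b : Nat) : Int :=
  (pyGetKV Y ((a : Int) + 1) ((b : Int) + 1)).getD 0

-- a present key makes the lookup succeed
theorem pyGetKV_isSome_of_mem (Y : List (Int × Int × Int)) (i j : Int)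
    (h : (i, j) ∈ Y.map (fun t => (t.1, t.2.1))) : (pyGetKV Y i j).isSome = true := by
  induction Y with
  | nil => simp at h
  | cons t rest ih =>
    simp only [List.map_cons, List.mem_cons] at h
    simp only [pyGetKV]
    by_cases hc : t.1 = i ∧ t.2.1 = j
    · rw [if_pos hc]; rfl
    · rw [if_neg hc]
      rcases h with h | h
      · obtain ⟨e1, e2⟩ := (Prod.mk.injEq _ _ _ _).mp h
        exact absurd ⟨e1.symm, e2.symm⟩ hc
      · exact ih h

-- a successful lookup comes from an entry of the list
theorem mem_of_pyGetKV (Y : List (Int × Int × Int)) (i j w : Int)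
    (h : pyGetKV Y i j = some w) : (i, j, w) ∈ Y := by
  induction Y with
  | nil => simp [pyGetKV] at h
  | cons t rest ih =>
    rcases t with ⟨t1, t2, t3⟩
    simp only [pyGetKV] at h
    by_cases hc : t1 = i ∧ t2 = j
    · rw [if_pos hc] at h
      obtain ⟨h1, h2⟩ := hc
      simp only [Option.some.injEq] at h
      subst h1; subst h2; subst h
      exact List.mem_cons_self
    · rw [if_neg hc] at h
      exact List.mem_cons_of_mem _ (ih h)

-- monotonicity along a row, chained from adjacent cells
theorem row_chain (Y : List (Int × Int × Int)) (m n : Int)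
    (hrs : ∀ a < m.toNat, ∀ b < n.toNat - 1, cellv Y a b ≤ cellv Y a (b + 1)) :
    ∀ a, a < m.toNat → ∀ b c : Nat, b ≤ c → c < n.toNat → cellv Y a b ≤ cellv Y a c := by
  intro a ha b c hbc
  induction hbc with
  | refl => intro _; exact le_refl _
  | step h ih =>
    intro hc
    exact le_trans (ih (by omega)) (hrs a ha _ (by omega))

-- monotonicity along a column, chained from adjacent cells
theorem col_chain (Y : List (Int × Int × Int)) (m n : Int)
    (hcs : ∀ a < m.toNat - 1, ∀ b < n.toNat, cellv Y a b ≤ cellv Y (a + 1) b) :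
    ∀ a c : Nat, a ≤ c → c < m.toNat → ∀ b, b < n.toNat → cellv Y a b ≤ cellv Y c b := by
  intro a c hac
  induction hac with
  | refl => intro _ b _; exact le_refl _
  | step h ih =>
    intro hc b hb
    exact le_trans (ih (by omega) b hb) (hcs _ (by omega) b hb)

-- the staircase loop returns true iff v occurs in the remaining region rows i..m, columns 1..j
theorem loopA_iff (Y : List (Int × Int × Int)) (m n v : Int)
    (Hcomp : ∀ p q : Int, 1 ≤ p → p ≤ m → 1 ≤ q → q ≤ n → (pyGetKV Y p q).isSome = true)
    (Hrow : ∀ p q q' : Int, 1 ≤ p → p ≤ m → 1 ≤ q → q ≤ q' → q' ≤ n →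
      (pyGetKV Y p q).getD 0 ≤ (pyGetKV Y p q').getD 0)
    (Hcol : ∀ p p' q : Int, 1 ≤ p → p ≤ p' → p' ≤ m → 1 ≤ q → q ≤ n →
      (pyGetKV Y p q).getD 0 ≤ (pyGetKV Y p' q).getD 0) :
    ∀ i j : Int, 1 ≤ i → j ≤ n →
      (youngLoopA Y m v i j = true ↔
        ∃ p q : Int, i ≤ p ∧ p ≤ m ∧ 1 ≤ q ∧ q ≤ j ∧ pyGetKV Y p q = some v) := by
  intro i j
  fun_induction youngLoopA Y m v i j with
  | case1 i j h hnone =>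
    intro hi hj
    exact absurd (Hcomp i j hi h.1 h.2 hj) (by simp [hnone])
  | case2 i j h hget =>
    intro hi hj
    simp only [true_iff]
    exact ⟨i, j, le_refl _, h.1, h.2, le_refl _, hget⟩
  | case3 i j h y hget hv hgt ih =>
    intro hi hj
    rw [ih (by omega) hj]
    constructor
    · rintro ⟨p, q, h1, h2, h3, h4, h5⟩
      exact ⟨p, q, by omega, h2, h3, h4, h5⟩
    · rintro ⟨p, q, h1, h2, h3, h4, h5⟩
      refine ⟨p, q, ?_, h2, h3, h4, h5⟩
      by_contra hlt
      have hpi : p = i := by omega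
      rw [hpi] at h5
      have hr := Hrow i q j hi h.1 h3 h4 hj
      rw [h5, hget] at hr
      simp only [Option.getD_some] at hr
      omega
  | case4 i j h y hget hv hgt ih =>
    intro hi hj
    rw [ih hi (by omega)]
    constructor
    · rintro ⟨p, q, h1, h2, h3, h4, h5⟩
      exact ⟨p, q, h1, h2, h3, by omega, h5⟩
    · rintro ⟨p, q, h1, h2, h3, h4, h5⟩
      refine ⟨p, q, h1, h2, h3, ?_, h5⟩
      by_contra hlt
      have hqj : q = j := by omega
      rw [hqj] at h5
      have hc := Hcol i p j hi h1 h2 h.2 hj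
      rw [h5, hget] at hc
      simp only [Option.getD_some] at hc
      omega
  | case5 i j h =>
    intro hi hj
    simp only [Bool.false_eq_true, false_iff]
    rintro ⟨p, q, h1, h2, h3, h4, _⟩
    omega

-- B as a whole returns true iff v occurs somewhere in the m×n grid (no hypotheses needed:
-- the flat scan just tests every cell)
theorem alt_iff (Y : List (Int × Int × Int)) (m n v : Int) :
    young_search_alt Y m n v = true ↔
      ∃ p q : Int, 1 ≤ p ∧ p ≤ m ∧ 1 ≤ q ∧ q ≤ n ∧ pyGetKV Y p q = some v := by
  unfold young_search_alt
  split
  · rename_i hmn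
    simp only [Bool.false_eq_true, false_iff]
    rintro ⟨p, q, h1, h2, h3, h4, _⟩
    omega
  simp only [List.any_eq_true, PySem.List.mem_pyRange_one]
  constructor
  · rintro ⟨p, ⟨hp1, hp2⟩, q, ⟨hq1, hq2⟩, hb⟩
    refine ⟨p, q, hp1, by omega, hq1, by omega, ?_⟩
    revert hb
    cases hg : pyGetKV Y p q with
    | none => intro hb; exact absurd hb (by simp)
    | some y =>
      intro hb
      have : y = v := by simpa using hb
      rw [this]
  · rintro ⟨p, q, h1, h2, h3, h4, h5⟩
    exact ⟨p, ⟨h1, by omega⟩, q, ⟨h3, by omega⟩, by rw [h5]; simp⟩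

-- ===== VERDICT (by name: the statement is the Claim_ definition above) =====
theorem young_search_spec : Claim_equal_young_search := by
  intro Y m n v _ hpre
  unfold Spec_young_search
  by_cases hmn : 1 ≤ m ∧ 1 ≤ n
  · obtain ⟨hlen, hcompN, hrowP, hcolP⟩ := hpre.2 hmn.1 hmn.2
    have Hget : ∀ p q : Int, 1 ≤ p → p ≤ m → 1 ≤ q → q ≤ n →
        ∃ w, pyGetKV Y p q = some w ∧ (p, q, w) ∈ Y := by
      intro p q h1 h2 h3 h4
      have hmem := hcompN (p - 1).toNat (by omega) (q - 1).toNat (by omega)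
      have e1 : ((p - 1).toNat : Int) + 1 = p := by omega
      have e2 : ((q - 1).toNat : Int) + 1 = q := by omega
      rw [e1, e2] at hmem
      obtain ⟨w, hw⟩ := Option.isSome_iff_exists.mp (pyGetKV_isSome_of_mem Y p q hmem)
      exact ⟨w, hw, mem_of_pyGetKV Y p q w hw⟩
    have Hcomp : ∀ p q : Int, 1 ≤ p → p ≤ m → 1 ≤ q → q ≤ n → (pyGetKV Y p q).isSome = true := by
      intro p q h1 h2 h3 h4
      obtain ⟨w, hw, _⟩ := Hget p q h1 h2 h3 h4
      rw [hw]; rfl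
    have hrowN : ∀ a < m.toNat, ∀ b < n.toNat - 1, cellv Y a b ≤ cellv Y a (b + 1) := by
      intro a ha b hb
      obtain ⟨w, hw, hmw⟩ := Hget ((a : Int) + 1) ((b : Int) + 1) (by omega) (by omega) (by omega) (by omega)
      obtain ⟨w', hw', hmw'⟩ := Hget ((a : Int) + 1) ((b : Int) + 2) (by omega) (by omega) (by omega) (by omega)
      have hle : w ≤ w' := hrowP _ hmw _ hmw'
        (show (1 : Int) ≤ (a : Int) + 1 by omega) (show (a : Int) + 1 ≤ m by omega)
        (show (1 : Int) ≤ (b : Int) + 1 by omega) (show (b : Int) + 2 ≤ n by omega)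
        rfl (show ((b : Int) + 1) + 1 = (b : Int) + 2 by ring)
      have ec : ((b + 1 : Nat) : Int) + 1 = (b : Int) + 2 := by push_cast; ring
      simp only [cellv, ec, hw, hw', Option.getD_some]
      exact hle
    have hcolN : ∀ a < m.toNat - 1, ∀ b < n.toNat, cellv Y a b ≤ cellv Y (a + 1) b := by
      intro a ha b hb
      obtain ⟨w, hw, hmw⟩ := Hget ((a : Int) + 1) ((b : Int) + 1) (by omega) (by omega) (by omega) (by omega)
      obtain ⟨w', hw', hmw'⟩ := Hget ((a : Int) + 2) ((b : Int) + 1) (by omega) (by omega) (by omega) (by omega)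
      have hle : w ≤ w' := hcolP _ hmw _ hmw'
        (show (1 : Int) ≤ (b : Int) + 1 by omega) (show (b : Int) + 1 ≤ n by omega)
        (show (1 : Int) ≤ (a : Int) + 1 by omega) (show (a : Int) + 2 ≤ m by omega)
        rfl (show ((a : Int) + 1) + 1 = (a : Int) + 2 by ring)
      have ec : ((a + 1 : Nat) : Int) + 1 = (a : Int) + 2 := by push_cast; ring
      simp only [cellv, ec, hw, hw', Option.getD_some]
      exact hle
    have Hrow : ∀ p q q' : Int, 1 ≤ p → p ≤ m → 1 ≤ q → q ≤ q' → q' ≤ n →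
        (pyGetKV Y p q).getD 0 ≤ (pyGetKV Y p q').getD 0 := by
      intro p q q' h1 h2 h3 h4 h5
      have := row_chain Y m n hrowN (p - 1).toNat (by omega)
        (q - 1).toNat (q' - 1).toNat (by omega) (by omega)
      simp only [cellv] at this
      have e1 : ((p - 1).toNat : Int) + 1 = p := by omega
      have e2 : ((q - 1).toNat : Int) + 1 = q := by omega
      have e3 : ((q' - 1).toNat : Int) + 1 = q' := by omega
      rwa [e1, e2, e3] at this
    have Hcol : ∀ p p' q : Int, 1 ≤ p → p ≤ p' → p' ≤ m → 1 ≤ q → q ≤ n →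
        (pyGetKV Y p q).getD 0 ≤ (pyGetKV Y p' q).getD 0 := by
      intro p p' q h1 h2 h3 h4 h5
      have := col_chain Y m n hcolN (p - 1).toNat (p' - 1).toNat (by omega) (by omega)
        (q - 1).toNat (by omega)
      simp only [cellv] at this
      have e1 : ((p - 1).toNat : Int) + 1 = p := by omega
      have e2 : ((p' - 1).toNat : Int) + 1 = p' := by omega
      have e3 : ((q - 1).toNat : Int) + 1 = q := by omega
      rwa [e1, e2, e3] at this
    rw [Bool.eq_iff_iff]
    rw [show young_search Y m n v = youngLoopA Y m v 1 n from rfl]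
    rw [loopA_iff Y m n v Hcomp Hrow Hcol 1 n (le_refl _) (le_refl _)]
    rw [alt_iff Y m n v]
  · have hA : young_search Y m n v = false := by
      rw [show young_search Y m n v = youngLoopA Y m v 1 n from rfl]
      rw [youngLoopA.eq_def]
      rw [dif_neg hmn]
    have hB : young_search_alt Y m n v = false := by
      rcases Bool.eq_false_or_eq_true (young_search_alt Y m n v) with h | h
      · obtain ⟨p, q, h1, h2, h3, h4, _⟩ := (alt_iff Y m n v).mp h
        omega
      · exact h
    rw [hA, hB]
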